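-- pv_equiv track=rewrite | github.com/bllchmbrs/hyperlint | src/hyperlint/editors/core.py | _get_surrounding_lines
-- ===== SOURCE A (Python) =====
-- from typing import Dict, List, Optional, Union
--
-- def _get_surrounding_lines(
--     line_number: int, line_count: int, line_lookup: Dict[int, str]
-- ) -> List[str]:
--     # Get surrounding lines for a given line number
--     surrounding_lines: List[str] = []
--     # Determine the range of lines to include
--     start_line = max(1, line_number - line_count)
--     end_line = line_number + line_count + 1
--
--     # Collect all lines in range
--     for line_no in range(start_line, end_line):
--         if line_no in line_lookup:
--             surrounding_lines.append(f"{line_no}: {line_lookup[line_no]}")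
--
--     return surrounding_lines
-- ===== SOURCE B (Python) =====
-- def _get_surrounding_lines(line_number, line_count, line_lookup):
--     lo = max(1, line_number - line_count)
--     hi = line_number + line_count + 1
--     pairs = sorted(line_lookup.items())
--     return [f"{k}: {v}" for k, v in pairs if lo <= k < hi]
-- ===== Notes on version B (the rewrite author's own statement) =====
-- stated objective: alternative
-- what changed: B never probes a dict: it sorts the item list once by key and emits the formatted pairs whose key lies in the surrounding range, instead of scanning every integer of the range and looking each up in the dict.
import Mathlib
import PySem

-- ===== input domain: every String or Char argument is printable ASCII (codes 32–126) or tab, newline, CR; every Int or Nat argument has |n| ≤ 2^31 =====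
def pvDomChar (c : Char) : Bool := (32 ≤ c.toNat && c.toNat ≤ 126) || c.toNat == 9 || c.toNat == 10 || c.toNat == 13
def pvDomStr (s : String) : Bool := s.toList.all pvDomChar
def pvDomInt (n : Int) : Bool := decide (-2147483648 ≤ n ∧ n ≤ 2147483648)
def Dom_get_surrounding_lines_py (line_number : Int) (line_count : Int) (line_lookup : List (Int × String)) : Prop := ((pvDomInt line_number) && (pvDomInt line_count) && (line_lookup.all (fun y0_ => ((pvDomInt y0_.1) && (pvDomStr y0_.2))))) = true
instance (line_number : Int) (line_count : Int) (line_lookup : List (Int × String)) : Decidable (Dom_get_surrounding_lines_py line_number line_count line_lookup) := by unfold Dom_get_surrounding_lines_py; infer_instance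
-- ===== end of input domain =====

-- B sorts the item list once by key and emits the formatted in-range pairs directly,
-- instead of probing every integer of the surrounding range against a dict (alternative decomposition).


-- ===== PORT A =====
def get_surrounding_lines_py (line_number : Int) (line_count : Int) (line_lookup : List (Int × String)) : List String :=
  let d : PySem.Dict Int String := PySem.Dict.mk line_lookup
  let start_line := max 1 (line_number - line_count)
  let end_line := line_number + line_count + 1
  (PySem.List.pyRange start_line end_line 1).foldl
    (fun surrounding_lines line_no =>
      if d.contains line_no then
        surrounding_lines ++ [PySem.Int.toStr line_no ++ ": " ++ d.getD line_no ""]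
      else surrounding_lines) []

-- ===== PORT B =====
-- Source B sorts the (key, value) items; dict items have distinct keys (Pre_), so Python's
-- tuple sort is exactly the sort by key used here.
def get_surrounding_lines_py_alt (line_number : Int) (line_count : Int) (line_lookup : List (Int × String)) : List String :=
  let lo := max 1 (line_number - line_count)
  let hi := line_number + line_count + 1
  let pairs := PySem.List.sorted line_lookup (fun p => p.1)
  (pairs.filter (fun p => decide (lo ≤ p.1) && decide (p.1 < hi))).map
    (fun p => PySem.Int.toStr p.1 ++ ": " ++ p.2)

-- ===== PRECONDITION & SPEC =====
-- Pre_ requires distinct keys: a Python dict can never hold duplicate keys, so association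
-- lists with repeated keys represent no Python input; nothing A accepts is excluded.
def Pre_get_surrounding_lines_py (line_number : Int) (line_count : Int) (line_lookup : List (Int × String)) : Prop :=
  (line_lookup.map Prod.fst).Nodup
instance (line_number : Int) (line_count : Int) (line_lookup : List (Int × String)) : Decidable (Pre_get_surrounding_lines_py line_number line_count line_lookup) := by unfold Pre_get_surrounding_lines_py; infer_instance
def pvWitness_get_surrounding_lines_py : Int × Int × (List (Int × String)) := (5, 2, [(1, "a"), (4, "b"), (6, "c"), (7, "d")])
def Spec_get_surrounding_lines_py (line_number : Int) (line_count : Int) (line_lookup : List (Int × String)) (out : List String) : Prop := out = get_surrounding_lines_py_alt line_number line_count line_lookup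
instance (line_number : Int) (line_count : Int) (line_lookup : List (Int × String)) (out : List String) : Decidable (Spec_get_surrounding_lines_py line_number line_count line_lookup out) := by unfold Spec_get_surrounding_lines_py; infer_instance

-- ===== CLAIM (what is proved, stated in full; the proofs are below) =====
def Claim_equal_get_surrounding_lines_py : Prop := ∀ (line_number : Int) (line_count : Int) (line_lookup : List (Int × String)), Dom_get_surrounding_lines_py line_number line_count line_lookup → Pre_get_surrounding_lines_py line_number line_count line_lookup → Spec_get_surrounding_lines_py line_number line_count line_lookup (get_surrounding_lines_py line_number line_count line_lookup)

-- ===== LEMMAS AND PROOFS =====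

-- The key sequences the two ports format are equal: the in-range keys of the dict, ascending.
theorem pv_keys_eq (lo hi : Int) (ll : List (Int × String))
    (hnd : (ll.map Prod.fst).Nodup) :
    ((PySem.List.sorted ll (fun p => p.1)).map Prod.fst).filter
        (fun k => decide (lo ≤ k) && decide (k < hi)) =
      (PySem.List.pyRange lo hi 1).filter (fun k => (PySem.Dict.mk ll).contains k) := by
  have hSperm : ((PySem.List.sorted ll (fun p => p.1)).map Prod.fst).Perm (ll.map Prod.fst) :=
    (PySem.List.sorted_perm ll (fun p => p.1) false).map Prod.fst
  apply PySem.List.eq_of_perm_of_pairwise_le_of_injective (fun k : Int => k)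
    (fun _ _ h => h)
  · rw [List.perm_ext_iff_of_nodup ((hSperm.nodup_iff.mpr hnd).filter _)
      ((PySem.List.nodup_pyRange_one lo hi).filter _)]
    intro k
    simp only [List.mem_filter, hSperm.mem_iff, PySem.List.mem_pyRange_one,
      PySem.Dict.contains_iff_mem_keys, PySem.Dict.keys_mk,
      Bool.and_eq_true, decide_eq_true_eq]
    tauto
  · exact (PySem.List.sorted_map_key_pairwise ll (fun p => p.1)).filter _
  · exact ((PySem.List.pairwise_lt_pyRange_one lo hi).filter _).imp le_of_lt

-- On a nodup-key list, each stored pair's value is what the dict lookup returns.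
theorem pv_val_eq (ll : List (Int × String)) (hnd : (ll.map Prod.fst).Nodup)
    (p : Int × String) (hp : p ∈ ll) :
    (PySem.Dict.mk ll).getD p.1 "" = p.2 := by
  apply PySem.Dict.getD_of_mem_items (k := p.1) (v := p.2)
  · exact hp
  · simpa [PySem.Dict.keys_mk] using hnd

theorem get_surrounding_lines_py_spec : Claim_equal_get_surrounding_lines_py := by
  intro line_number line_count line_lookup _hDom hPre
  unfold Spec_get_surrounding_lines_py get_surrounding_lines_py get_surrounding_lines_py_alt
  simp only []
  rw [PySem.List.foldl_append_if
      (fun k => (PySem.Dict.mk line_lookup).contains k)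
      (fun k => PySem.Int.toStr k ++ ": " ++ (PySem.Dict.mk line_lookup).getD k "")]
  rw [← pv_keys_eq _ _ _ hPre, List.filter_map, List.map_map]
  simp only [List.nil_append]
  apply List.map_congr_left
  intro p hp
  have hmem : p ∈ line_lookup := by
    have := (List.mem_filter.mp hp).1
    simpa [PySem.List.mem_sorted] using this
  simp [Function.comp, pv_val_eq line_lookup hPre p hmem]

-- ===== VERDICT above: get_surrounding_lines_py_spec proves Claim_equal_get_surrounding_lines_py =====
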